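-- pv_equiv track=rewrite | github.com/fa7271/Python-Algorithm | bs/Programmers/etc/카페 확장.py | solution
-- ===== SOURCE A (Python) =====
-- from collections import deque
--
-- def solution(menu, order, k):
--     res = 0
--     n = len(order)
--     queue = deque()
--     time = 0
--     idx = 0
--     while queue or idx < n:
--         if not queue: # queue가 비어있으면
--             time = (idx*k) +menu[order[idx]] # 끝나는 시간으로 time을 넣어주고
--             idx += 1 # 다음 일 할 차례
--         else:
--             x = queue.popleft() # 할 일이 있으면
--             time += menu[x] # 할일 끝나는 시간을 더해줌
--         while idx < n and idx <= ((time-1) // k): # 밀린 주문을 넣어준다. time-1 // k를 해주 이전 시간 도착한 사람들의 idx를 처리해준다.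
--             queue.append(order[idx])
--             idx +=1
--         res = max(res,len(queue))
--     return res+1
-- ===== SOURCE B (Python) =====
-- def solution(menu, order, k):
--     # One pass computing each order's finish time and the running "last enqueued
--     # index" cap; the waiting-queue length after step i is a closed-form count,
--     # so no deque or inner enqueue loop is needed.
--     n = len(order)
--     res = 0
--     cap = -1
--     prev = 0
--     for i in range(n):
--         start = prev if i <= cap else i * k
--         prev = start + menu[order[i]]
--         c = (prev - 1) // k
--         if c > cap:
--             cap = c
--         waiting = min(cap, n - 1) - i
--         if waiting > res:
--             res = waiting
--     return res + 1
-- ===== Notes on version B (the rewrite author's own statement) =====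
-- stated objective: alternative
-- what changed: Replaces the step-by-step deque simulation (outer while with a pop/reset branch plus an inner enqueue loop) by a single for-pass that computes each order's finish time and a running last-enqueued-index cap, from which the queue length after each step is a closed-form expression; no queue data structure or inner loop remains.
-- outside the precondition, e.g. on solution([0], [0], 0): A returns 1, B raises ZeroDivisionError
import Mathlib
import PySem

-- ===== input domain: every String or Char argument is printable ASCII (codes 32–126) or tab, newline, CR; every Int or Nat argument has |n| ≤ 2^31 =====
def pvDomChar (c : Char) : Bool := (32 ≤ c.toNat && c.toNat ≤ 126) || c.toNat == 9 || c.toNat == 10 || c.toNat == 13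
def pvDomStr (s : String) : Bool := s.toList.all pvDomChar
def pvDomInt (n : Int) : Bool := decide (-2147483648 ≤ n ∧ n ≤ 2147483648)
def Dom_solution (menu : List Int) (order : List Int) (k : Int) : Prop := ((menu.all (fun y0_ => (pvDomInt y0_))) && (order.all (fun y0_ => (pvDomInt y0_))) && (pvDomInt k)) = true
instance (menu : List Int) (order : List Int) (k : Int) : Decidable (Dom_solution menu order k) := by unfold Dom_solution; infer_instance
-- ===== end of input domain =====

-- B replaces A's deque simulation by one pass computing finish times and a running
-- enqueue cap, with the queue length obtained by a closed-form count (alternative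
-- decomposition, same asymptotic cost).


-- ===== PORT A =====
-- menu[o]: Python indexing with possible negative wraparound; inside Pre_ the
-- index is always in range, so the default 0 is never produced there.
def menuGet (menu : List Int) (o : Int) : Int := (PySem.List.pyGet? menu o).getD 0

-- the inner `while idx < n and idx <= (time-1)//k` enqueue loop
def solInner (order : List Int) (k time : Int) (queue : List Int) (idx : Nat) : List Int × Nat :=
  if h : idx < order.length ∧ (idx : Int) ≤ PySem.Int.floordiv (time - 1) k then
    solInner order k time (queue ++ [order.getD idx 0]) (idx + 1)
  else (queue, idx)
termination_by order.length - idx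
decreasing_by omega

-- the outer `while queue or idx < n` loop; fuel only makes it total, 2*n+1 steps always suffice
def solLoop (menu order : List Int) (k : Int) : Nat → Int → Int → List Int → Nat → Int
  | 0, res, _, _, _ => res
  | fuel + 1, res, time, queue, idx =>
    match queue with
    | [] =>
      if idx < order.length then
        let time' := (idx : Int) * k + menuGet menu (order.getD idx 0)
        let p := solInner order k time' [] (idx + 1)
        solLoop menu order k fuel (max res (p.1.length : Int)) time' p.1 p.2
      else res
    | x :: qs =>
      let time' := time + menuGet menu x
      let p := solInner order k time' qs idx
      solLoop menu order k fuel (max res (p.1.length : Int)) time' p.1 p.2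

def solution (menu : List Int) (order : List Int) (k : Int) : Int :=
  solLoop menu order k (2 * order.length + 1) 0 0 [] 0 + 1

-- ===== PORT B =====
def altStep (menu order : List Int) (k : Int) (st : Int × Int × Int) (i : Nat) : Int × Int × Int :=
  let res := st.1
  let cap := st.2.1
  let prev := st.2.2
  let start := if (i : Int) ≤ cap then prev else (i : Int) * k
  let prev' := start + menuGet menu (order.getD i 0)
  let c := PySem.Int.floordiv (prev' - 1) k
  let cap' := if c > cap then c else cap
  let waiting := min cap' ((order.length : Int) - 1) - (i : Int)
  let res' := if waiting > res then waiting else res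
  (res', cap', prev')

def solution_alt (menu : List Int) (order : List Int) (k : Int) : Int :=
  ((List.range order.length).foldl (altStep menu order k) (0, -1, 0)).1 + 1

-- ===== PRECONDITION & SPEC =====
-- Pre_ excludes the inputs on which the Python A raises: an order entry out of
-- range as an index into menu (IndexError, after negative wraparound), and k = 0
-- (ZeroDivisionError at the enqueue check); with k = 0 and at most one order A
-- never reaches the division and returns, but B's per-step division raises there,
-- so all of k = 0 is excluded.
def Pre_solution (menu : List Int) (order : List Int) (k : Int) : Prop :=
  k ≠ 0 ∧ ∀ o ∈ order, -(menu.length : Int) ≤ o ∧ o < (menu.length : Int)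
instance (menu : List Int) (order : List Int) (k : Int) : Decidable (Pre_solution menu order k) := by
  unfold Pre_solution; infer_instance

def pvWitness_solution : List Int × List Int × Int := ([3, 2, 5], [0, 2, 1, 0], 2)

def Spec_solution (menu : List Int) (order : List Int) (k : Int) (out : Int) : Prop := out = solution_alt menu order k
instance (menu : List Int) (order : List Int) (k : Int) (out : Int) : Decidable (Spec_solution menu order k out) := by unfold Spec_solution; infer_instance

-- ===== CLAIM (what is proved, stated in full; the proofs are below) =====
def Claim_equal_solution : Prop := ∀ (menu : List Int) (order : List Int) (k : Int), Dom_solution menu order k → Pre_solution menu order k → Spec_solution menu order k (solution menu order k)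

-- ===== LEMMAS AND PROOFS =====

-- index just past the last enqueued order when `cap` is the running max of (finish-1)//k
def capIdx (order : List Int) (i : Nat) (cap : Int) : Nat :=
  max i (min order.length (cap + 1).toNat)

-- A's queue contents at the top of the outer loop
def qOf (order : List Int) (i : Nat) (cap : Int) : List Int :=
  (List.range' i (capIdx order i cap - i)).map (fun j => order.getD j 0)

lemma capIdx_le (order : List Int) (i : Nat) (cap : Int) (h : i ≤ order.length) :
    capIdx order i cap ≤ order.length := by
  unfold capIdx; omega

lemma solInner_eq (order : List Int) (k time : Int) :
    ∀ (m idx : Nat), order.length - idx ≤ m → ∀ (queue : List Int),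
      solInner order k time queue idx =
        (queue ++ (List.range' idx
            (capIdx order idx (PySem.Int.floordiv (time - 1) k) - idx)).map
            (fun j => order.getD j 0),
         capIdx order idx (PySem.Int.floordiv (time - 1) k)) := by
  intro m
  induction m with
  | zero =>
    intro idx hm queue
    rw [solInner]
    rw [dif_neg (by omega)]
    have : capIdx order idx (PySem.Int.floordiv (time - 1) k) = idx := by
      unfold capIdx; omega
    rw [this]; simp
  | succ m ih =>
    intro idx hm queue
    rw [solInner]
    by_cases h : idx < order.length ∧ (idx : Int) ≤ PySem.Int.floordiv (time - 1) k
    · rw [dif_pos h]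
      rw [ih (idx + 1) (by omega)]
      have hcap : capIdx order (idx + 1) (PySem.Int.floordiv (time - 1) k)
          = capIdx order idx (PySem.Int.floordiv (time - 1) k) := by
        unfold capIdx; omega
      have hlen : capIdx order idx (PySem.Int.floordiv (time - 1) k) - idx
          = (capIdx order (idx + 1) (PySem.Int.floordiv (time - 1) k) - (idx + 1)) + 1 := by
        unfold capIdx; omega
      rw [hcap, hlen, List.range'_succ]
      simp
      rw [hcap]
    · rw [dif_neg h]
      have : capIdx order idx (PySem.Int.floordiv (time - 1) k) = idx := by
        unfold capIdx; omega
      rw [this]; simp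

lemma solLoop_eq (menu order : List Int) (k : Int) :
    ∀ (fuel i : Nat) (res cap prev time : Int),
      i ≤ order.length → 0 ≤ res →
      2 * (order.length - capIdx order i cap) + (capIdx order i cap - i) < fuel →
      (qOf order i cap ≠ [] → time = prev) →
      solLoop menu order k fuel res time (qOf order i cap) (capIdx order i cap) =
        ((List.range' i (order.length - i)).foldl (altStep menu order k) (res, cap, prev)).1 := by
  intro fuel
  induction fuel with
  | zero => intro i res cap prev time _ _ hfuel _; omega
  | succ fuel ih =>
    intro i res cap prev time hi hres hfuel htime
    by_cases hin : i < order.length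
    · by_cases hc : (i : Int) ≤ cap
      · -- queue nonempty: pop branch
        have hL1 : i + 1 ≤ capIdx order i cap := by unfold capIdx; omega
        have hLn : capIdx order i cap ≤ order.length := capIdx_le order i cap (by omega)
        have hqne : qOf order i cap ≠ [] := by
          unfold qOf
          simp only [ne_eq, List.map_eq_nil_iff, List.range'_eq_nil_iff]
          omega
        have hqcons : qOf order i cap = order.getD i 0 ::
            (List.range' (i + 1) (capIdx order i cap - (i + 1))).map (fun j => order.getD j 0) := by
          unfold qOf
          rw [show capIdx order i cap - i = (capIdx order i cap - (i + 1)) + 1 from by omega,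
        List.range'_succ]
          simp
        rw [hqcons, htime hqne]
        simp only [solLoop]
        rw [solInner_eq order k _ order.length (capIdx order i cap) (by omega)]
        have hJL : capIdx order i cap ≤ capIdx order (capIdx order i cap)
            (PySem.Int.floordiv (prev + menuGet menu (order.getD i 0) - 1) k) := by
          unfold capIdx; omega
        have hJn : capIdx order (capIdx order i cap)
            (PySem.Int.floordiv (prev + menuGet menu (order.getD i 0) - 1) k)
            ≤ order.length := capIdx_le order _ _ hLn
        have hJeq : capIdx order (capIdx order i cap)
            (PySem.Int.floordiv (prev + menuGet menu (order.getD i 0) - 1) k)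
            = capIdx order (i + 1)
              (if PySem.Int.floordiv (prev + menuGet menu (order.getD i 0) - 1) k > cap
                then PySem.Int.floordiv (prev + menuGet menu (order.getD i 0) - 1) k
                else cap) := by
          unfold capIdx; split_ifs <;> omega
        -- glue the two ranges of the queue together
        have hqq : (List.range' (i + 1) (capIdx order i cap - (i + 1))).map
              (fun j => order.getD j 0) ++
            (List.range' (capIdx order i cap)
              (capIdx order (capIdx order i cap)
                (PySem.Int.floordiv (prev + menuGet menu (order.getD i 0) - 1) k)
                - capIdx order i cap)).map (fun j => order.getD j 0)
            = (List.range' (i + 1)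
                (capIdx order (capIdx order i cap)
                  (PySem.Int.floordiv (prev + menuGet menu (order.getD i 0) - 1) k)
                  - (i + 1))).map (fun j => order.getD j 0) := by
          rw [← List.map_append]
          congr 1
          have h1 : List.range' (i + 1) (capIdx order i cap - (i + 1)) ++
              List.range' ((i + 1) + (capIdx order i cap - (i + 1)))
                (capIdx order (capIdx order i cap)
                  (PySem.Int.floordiv (prev + menuGet menu (order.getD i 0) - 1) k)
                  - capIdx order i cap)
              = List.range' (i + 1) ((capIdx order i cap - (i + 1)) +
                  (capIdx order (capIdx order i cap)
                    (PySem.Int.floordiv (prev + menuGet menu (order.getD i 0) - 1) k)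
                    - capIdx order i cap)) := List.range'_append_1
          rw [show (i + 1) + (capIdx order i cap - (i + 1)) = capIdx order i cap from by omega] at h1
          rw [h1]
          congr 1
          omega
        rw [hqq, hJeq]
        -- unfold one step of B's fold
        rw [show order.length - i = (order.length - (i + 1)) + 1 from by omega,
            List.range'_succ, List.foldl_cons]
        have hstep : altStep menu order k (res, cap, prev) i
            = (max res ((capIdx order (i + 1)
                  (if PySem.Int.floordiv (prev + menuGet menu (order.getD i 0) - 1) k > cap
                    then PySem.Int.floordiv (prev + menuGet menu (order.getD i 0) - 1) k
                    else cap) - (i + 1) : Nat) : Int),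
               (if PySem.Int.floordiv (prev + menuGet menu (order.getD i 0) - 1) k > cap
                  then PySem.Int.floordiv (prev + menuGet menu (order.getD i 0) - 1) k
                  else cap),
               prev + menuGet menu (order.getD i 0)) := by
          unfold altStep
          dsimp only
          rw [if_pos hc, Prod.mk.injEq, Prod.mk.injEq]
          refine ⟨?_, rfl, rfl⟩
          unfold capIdx
          split_ifs <;> omega
        rw [hstep]
        dsimp only
        simp only [List.length_map, List.length_range']
        exact ih (i + 1) _ _ _ _ (by omega) (le_max_of_le_left hres)
          (by rw [← hJeq]; omega)
          (fun _ => rfl)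
      · -- queue empty: reset branch
        have hcap : capIdx order i cap = i := by unfold capIdx; omega
        have hq : qOf order i cap = [] := by unfold qOf; rw [hcap]; simp
        rw [hq, hcap]
        simp only [solLoop]
        rw [if_pos hin]
        rw [solInner_eq order k _ order.length (i + 1) (by omega)]
        have hJn : capIdx order (i + 1)
            (PySem.Int.floordiv ((i : Int) * k + menuGet menu (order.getD i 0) - 1) k)
            ≤ order.length := capIdx_le order (i + 1) _ (by omega)
        have hJi : i + 1 ≤ capIdx order (i + 1)
            (PySem.Int.floordiv ((i : Int) * k + menuGet menu (order.getD i 0) - 1) k) := by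
          unfold capIdx; omega
        -- unfold one step of B's fold
        have hrange : order.length - i = (order.length - (i + 1)) + 1 := by omega
        rw [hrange, List.range'_succ, List.foldl_cons]
        -- the two new states coincide
        have hstep : altStep menu order k (res, cap, prev) i
            = (max res ((capIdx order (i + 1)
                  (PySem.Int.floordiv ((i : Int) * k + menuGet menu (order.getD i 0) - 1) k)
                  - (i + 1) : Nat) : Int),
               (if PySem.Int.floordiv ((i : Int) * k + menuGet menu (order.getD i 0) - 1) k > cap
                  then PySem.Int.floordiv ((i : Int) * k + menuGet menu (order.getD i 0) - 1) k
                  else cap),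
               (i : Int) * k + menuGet menu (order.getD i 0)) := by
          unfold altStep
          dsimp only
          rw [if_neg hc, Prod.mk.injEq, Prod.mk.injEq]
          refine ⟨?_, rfl, rfl⟩
          unfold capIdx
          split_ifs <;> omega
        have hcap2 : capIdx order (i + 1)
            (PySem.Int.floordiv ((i : Int) * k + menuGet menu (order.getD i 0) - 1) k)
            = capIdx order (i + 1)
              (if PySem.Int.floordiv ((i : Int) * k + menuGet menu (order.getD i 0) - 1) k > cap
                then PySem.Int.floordiv ((i : Int) * k + menuGet menu (order.getD i 0) - 1) k
                else cap) := by
          unfold capIdx; split_ifs <;> omega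
        rw [hstep, hcap2]
        dsimp only
        simp only [List.nil_append, List.length_map, List.length_range']
        exact ih (i + 1) _ _ _ _ (by omega) (le_max_of_le_left hres)
          (by
            have := capIdx_le order (i + 1)
              (if PySem.Int.floordiv ((i : Int) * k + menuGet menu (order.getD i 0) - 1) k > cap
                then PySem.Int.floordiv ((i : Int) * k + menuGet menu (order.getD i 0) - 1) k
                else cap) (by omega)
            rw [← hcap2] at this ⊢
            omega)
          (fun _ => rfl)
    · -- i = order.length: loop exits
      have hcap : capIdx order i cap = i := by unfold capIdx; omega
      have hq : qOf order i cap = [] := by unfold qOf; rw [hcap]; simp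
      rw [hq, hcap]
      simp only [solLoop]
      rw [if_neg hin]
      have : order.length - i = 0 := by omega
      rw [this]
      simp

-- ===== VERDICT (by name: the statement is the Claim_ definition above) =====
theorem solution_spec : Claim_equal_solution := by
  intro menu order k _hdom _hpre
  unfold Spec_solution solution solution_alt
  have h0 : capIdx order 0 (-1) = 0 := by unfold capIdx; omega
  have hq : qOf order 0 (-1) = [] := by unfold qOf; rw [h0]; simp
  have := solLoop_eq menu order k (2 * order.length + 1) 0 0 (-1) 0 0
    (Nat.zero_le _) le_rfl (by rw [h0]; omega) (by intro h; rfl)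
  rw [h0, hq] at this
  rw [this, List.range_eq_range']
  simp
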